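-- pv_equiv track=rewrite | github.com/onubrooks/datachat-community | backend/profiling/generator.py | _fallback_column_meaning
-- ===== SOURCE A (Python) =====
-- from collections.abc import Iterable
--
-- def _fallback_column_meaning(name: str, samples: Iterable[str]) -> str:
--     normalized = name.lower()
--     sample_preview = ", ".join(list(samples)[:3])
--     base = f"Auto-profiled column `{name}`."
--     if normalized == "id" or normalized.endswith("_id"):
--         base = f"Identifier column for `{name}`."
--     elif any(token in normalized for token in ["created", "updated", "timestamp", "date", "time"]):
--         base = f"Timestamp/date column `{name}` used for time-based analysis."
--     elif any(token in normalized for token in ["status", "state"]):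
--         base = f"Lifecycle status column `{name}`."
--     elif any(token in normalized for token in ["type", "category", "segment"]):
--         base = f"Classification column `{name}`."
--     elif any(token in normalized for token in ["amount", "price", "cost", "revenue"]):
--         base = f"Monetary value column `{name}`."
--     elif any(token in normalized for token in ["qty", "quantity", "count", "volume"]):
--         base = f"Volume/count column `{name}`."
--     elif any(token in normalized for token in ["email", "phone", "contact"]):
--         base = f"Contact information column `{name}`."
--     elif any(token in normalized for token in ["country", "region", "city", "state_code"]):
--         base = f"Geographic attribute column `{name}`."
--     elif normalized.startswith("is_") or normalized.startswith("has_") or normalized.endswith("_flag"):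
--         base = f"Boolean flag column `{name}`."
--
--     if sample_preview:
--         return f"{base} Example values: {sample_preview}."
--     return base
-- ===== SOURCE B (Python) =====
-- _GROUPS = {
--     1: ["created", "updated", "timestamp", "date", "time"],
--     2: ["status", "state"],
--     3: ["type", "category", "segment"],
--     4: ["amount", "price", "cost", "revenue"],
--     5: ["qty", "quantity", "count", "volume"],
--     6: ["email", "phone", "contact"],
--     7: ["country", "region", "city", "state_code"],
-- }
--
-- _TEMPLATES = {
--     0: "Identifier column for `{}`.",
--     1: "Timestamp/date column `{}` used for time-based analysis.",
--     2: "Lifecycle status column `{}`.",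
--     3: "Classification column `{}`.",
--     4: "Monetary value column `{}`.",
--     5: "Volume/count column `{}`.",
--     6: "Contact information column `{}`.",
--     7: "Geographic attribute column `{}`.",
--     8: "Boolean flag column `{}`.",
-- }
--
--
-- def _fallback_column_meaning(name, samples):
--     # Exhaustive scoring: collect the priority of EVERY matching heuristic
--     # (order-independent), then the best (minimum) priority decides; the
--     # priorities encode the original rule precedence, so min = first match.
--     n = name.lower()
--     scores = [0] if n == "id" or n.endswith("_id") else []
--     scores += [p for p, kws in _GROUPS.items() if any(k in n for k in kws)]
--     if n.startswith("is_") or n.startswith("has_") or n.endswith("_flag"):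
--         scores.append(8)
--     if scores:
--         base = _TEMPLATES[min(scores)].format(name)
--     else:
--         base = "Auto-profiled column `{}`.".format(name)
--     preview = ", ".join(list(samples)[:3])
--     return f"{base} Example values: {preview}." if preview else base
-- ===== Notes on version B (the rewrite author's own statement) =====
-- stated objective: alternative
-- what changed: B replaces A's short-circuit first-match if/elif ladder by exhaustive scoring: it collects the priority of every matching heuristic into a list and takes the minimum, which equals the first match because the priorities encode the ladder's order.
import Mathlib
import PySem

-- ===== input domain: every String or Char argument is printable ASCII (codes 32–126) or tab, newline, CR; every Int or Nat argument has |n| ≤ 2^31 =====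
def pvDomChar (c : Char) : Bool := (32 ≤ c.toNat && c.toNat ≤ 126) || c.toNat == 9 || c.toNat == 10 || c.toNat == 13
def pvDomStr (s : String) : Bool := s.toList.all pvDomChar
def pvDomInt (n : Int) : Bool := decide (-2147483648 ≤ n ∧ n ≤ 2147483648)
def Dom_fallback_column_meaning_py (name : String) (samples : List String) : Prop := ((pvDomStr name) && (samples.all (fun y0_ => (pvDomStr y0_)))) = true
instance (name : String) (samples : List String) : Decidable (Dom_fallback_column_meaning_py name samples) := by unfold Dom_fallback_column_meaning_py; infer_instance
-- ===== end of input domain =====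

-- B replaces A's short-circuit if/elif ladder by exhaustive scoring: it collects the priorities of ALL matching heuristics and the minimum (= the original precedence) picks the template (alternative, same cost).

-- ===== PORT A =====
def fallback_column_meaning_py (name : String) (samples : List String) : String :=
  let normalized := PySem.Str.lower name
  let sample_preview := PySem.Str.join ", " (PySem.List.slice samples none (some 3))
  let base := "Auto-profiled column `" ++ name ++ "`."
  let base :=
    if normalized == "id" || PySem.Str.endswith normalized "_id" then
      "Identifier column for `" ++ name ++ "`."
    else if ["created", "updated", "timestamp", "date", "time"].any (fun token => PySem.Str.isIn token normalized) then
      "Timestamp/date column `" ++ name ++ "` used for time-based analysis."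
    else if ["status", "state"].any (fun token => PySem.Str.isIn token normalized) then
      "Lifecycle status column `" ++ name ++ "`."
    else if ["type", "category", "segment"].any (fun token => PySem.Str.isIn token normalized) then
      "Classification column `" ++ name ++ "`."
    else if ["amount", "price", "cost", "revenue"].any (fun token => PySem.Str.isIn token normalized) then
      "Monetary value column `" ++ name ++ "`."
    else if ["qty", "quantity", "count", "volume"].any (fun token => PySem.Str.isIn token normalized) then
      "Volume/count column `" ++ name ++ "`."
    else if ["email", "phone", "contact"].any (fun token => PySem.Str.isIn token normalized) then
      "Contact information column `" ++ name ++ "`."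
    else if ["country", "region", "city", "state_code"].any (fun token => PySem.Str.isIn token normalized) then
      "Geographic attribute column `" ++ name ++ "`."
    else if PySem.Str.startswith normalized "is_" || PySem.Str.startswith normalized "has_" || PySem.Str.endswith normalized "_flag" then
      "Boolean flag column `" ++ name ++ "`."
    else base
  if !(sample_preview == "") then
    base ++ " Example values: " ++ sample_preview ++ "."
  else base

-- ===== PORT B =====
-- Source B's _GROUPS dict: priority → keyword list (insertion order)
def pvGroups : List (Nat × List String) :=
  [ (1, ["created", "updated", "timestamp", "date", "time"]),
    (2, ["status", "state"]),
    (3, ["type", "category", "segment"]),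
    (4, ["amount", "price", "cost", "revenue"]),
    (5, ["qty", "quantity", "count", "volume"]),
    (6, ["email", "phone", "contact"]),
    (7, ["country", "region", "city", "state_code"]) ]

-- Source B's _TEMPLATES dict lookup (keys 0..8; only those are ever looked up)
def pvTemplate (p : Nat) (name : String) : String :=
  if p == 0 then "Identifier column for `" ++ name ++ "`."
  else if p == 1 then "Timestamp/date column `" ++ name ++ "` used for time-based analysis."
  else if p == 2 then "Lifecycle status column `" ++ name ++ "`."
  else if p == 3 then "Classification column `" ++ name ++ "`."
  else if p == 4 then "Monetary value column `" ++ name ++ "`."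
  else if p == 5 then "Volume/count column `" ++ name ++ "`."
  else if p == 6 then "Contact information column `" ++ name ++ "`."
  else if p == 7 then "Geographic attribute column `" ++ name ++ "`."
  else "Boolean flag column `" ++ name ++ "`."

def fallback_column_meaning_py_alt (name : String) (samples : List String) : String :=
  let n := PySem.Str.lower name
  let scores := if n == "id" || PySem.Str.endswith n "_id" then [0] else []
  -- the comprehension over _GROUPS.items(): one score per matching group
  let scores := scores ++ pvGroups.flatMap (fun g => if g.2.any (fun token => PySem.Str.isIn token n) then [g.1] else [])
  let scores := scores ++ (if PySem.Str.startswith n "is_" || PySem.Str.startswith n "has_" || PySem.Str.endswith n "_flag" then [8] else [])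
  let base :=
    match scores.min? with
    | some p => pvTemplate p name
    | none => "Auto-profiled column `" ++ name ++ "`."
  let preview := PySem.Str.join ", " (PySem.List.slice samples none (some 3))
  if !(preview == "") then base ++ " Example values: " ++ preview ++ "."
  else base

-- ===== PRECONDITION & SPEC =====
def Spec_fallback_column_meaning_py (name : String) (samples : List String) (out : String) : Prop := out = fallback_column_meaning_py_alt name samples
instance (name : String) (samples : List String) (out : String) : Decidable (Spec_fallback_column_meaning_py name samples out) := by unfold Spec_fallback_column_meaning_py; infer_instance

-- ===== CLAIM (what is proved, stated in full; the proofs are below) =====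
def Claim_equal_fallback_column_meaning_py : Prop := ∀ (name : String) (samples : List String), Dom_fallback_column_meaning_py name samples → Spec_fallback_column_meaning_py name samples (fallback_column_meaning_py name samples)

-- ===== LEMMAS AND PROOFS =====

theorem pvFoldlMin (a : ℕ) (l : List ℕ) (h : ∀ x ∈ l, a ≤ x) : List.foldl min a l = a := by
  induction l generalizing a with
  | nil => rfl
  | cons b t ih =>
    simp only [List.mem_cons, forall_eq_or_imp] at h
    simp only [List.foldl_cons, min_eq_left h.1]
    exact ih a h.2

theorem pvMinCons (a : ℕ) (l : List ℕ) (h : ∀ x ∈ l, a ≤ x) : (a :: l).min? = some a := by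
  rw [show (a :: l).min? = some (List.foldl min a l) from rfl, pvFoldlMin a l h]

-- ===== VERDICT (by name: the statement is the Claim_ definition above) =====
set_option maxHeartbeats 1600000 in
theorem fallback_column_meaning_py_spec : Claim_equal_fallback_column_meaning_py := by
  intro name samples _
  unfold Spec_fallback_column_meaning_py fallback_column_meaning_py fallback_column_meaning_py_alt pvGroups
  simp only [List.flatMap_cons, List.flatMap_nil, List.append_nil, List.nil_append]
  cases h1 : (PySem.Str.lower name == "id" || PySem.Str.endswith (PySem.Str.lower name) "_id")
  case true =>
    simp only [h1, if_true, List.cons_append, List.append_assoc, List.nil_append]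
    rw [pvMinCons 0 _ (fun x _ => Nat.zero_le x)]
    rfl
  case false =>
  simp only [h1, Bool.false_eq_true, if_false, List.nil_append]
  cases h2 : ["created", "updated", "timestamp", "date", "time"].any (fun token => PySem.Str.isIn token (PySem.Str.lower name))
  case true =>
    simp only [h2, if_true, List.cons_append, List.append_assoc, List.nil_append]
    rw [pvMinCons 1 _ (by intro x hx; split_ifs at hx <;> simp only [List.mem_append, List.mem_cons, List.not_mem_nil, or_false, false_or] at hx <;> omega)]
    rfl
  case false =>
  simp only [h2, Bool.false_eq_true, if_false, List.nil_append]
  cases h3 : ["status", "state"].any (fun token => PySem.Str.isIn token (PySem.Str.lower name))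
  case true =>
    simp only [h3, if_true, List.cons_append, List.append_assoc, List.nil_append]
    rw [pvMinCons 2 _ (by intro x hx; split_ifs at hx <;> simp only [List.mem_append, List.mem_cons, List.not_mem_nil, or_false, false_or] at hx <;> omega)]
    rfl
  case false =>
  simp only [h3, Bool.false_eq_true, if_false, List.nil_append]
  cases h4 : ["type", "category", "segment"].any (fun token => PySem.Str.isIn token (PySem.Str.lower name))
  case true =>
    simp only [h4, if_true, List.cons_append, List.append_assoc, List.nil_append]
    rw [pvMinCons 3 _ (by intro x hx; split_ifs at hx <;> simp only [List.mem_append, List.mem_cons, List.not_mem_nil, or_false, false_or] at hx <;> omega)]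
    rfl
  case false =>
  simp only [h4, Bool.false_eq_true, if_false, List.nil_append]
  cases h5 : ["amount", "price", "cost", "revenue"].any (fun token => PySem.Str.isIn token (PySem.Str.lower name))
  case true =>
    simp only [h5, if_true, List.cons_append, List.append_assoc, List.nil_append]
    rw [pvMinCons 4 _ (by intro x hx; split_ifs at hx <;> simp only [List.mem_append, List.mem_cons, List.not_mem_nil, or_false, false_or] at hx <;> omega)]
    rfl
  case false =>
  simp only [h5, Bool.false_eq_true, if_false, List.nil_append]
  cases h6 : ["qty", "quantity", "count", "volume"].any (fun token => PySem.Str.isIn token (PySem.Str.lower name))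
  case true =>
    simp only [h6, if_true, List.cons_append, List.append_assoc, List.nil_append]
    rw [pvMinCons 5 _ (by intro x hx; split_ifs at hx <;> simp only [List.mem_append, List.mem_cons, List.not_mem_nil, or_false, false_or] at hx <;> omega)]
    rfl
  case false =>
  simp only [h6, Bool.false_eq_true, if_false, List.nil_append]
  cases h7 : ["email", "phone", "contact"].any (fun token => PySem.Str.isIn token (PySem.Str.lower name))
  case true =>
    simp only [h7, if_true, List.cons_append, List.append_assoc, List.nil_append]
    rw [pvMinCons 6 _ (by intro x hx; split_ifs at hx <;> simp only [List.mem_append, List.mem_cons, List.not_mem_nil, or_false, false_or] at hx <;> omega)]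
    rfl
  case false =>
  simp only [h7, Bool.false_eq_true, if_false, List.nil_append]
  cases h8 : ["country", "region", "city", "state_code"].any (fun token => PySem.Str.isIn token (PySem.Str.lower name))
  case true =>
    simp only [h8, if_true, List.cons_append, List.append_assoc, List.nil_append]
    rw [pvMinCons 7 _ (by intro x hx; split_ifs at hx <;> simp only [List.mem_append, List.mem_cons, List.not_mem_nil, or_false, false_or] at hx <;> omega)]
    rfl
  case false =>
  simp only [h8, Bool.false_eq_true, if_false, List.nil_append]
  cases h9 : (PySem.Str.startswith (PySem.Str.lower name) "is_" || PySem.Str.startswith (PySem.Str.lower name) "has_" || PySem.Str.endswith (PySem.Str.lower name) "_flag")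
  case true =>
    simp only [h9, if_true, List.nil_append]
    rfl
  case false =>
    simp only [h9, Bool.false_eq_true, if_false]
    rfl
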